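-- pv_equiv track=rewrite | github.com/nh3bh3/cuthttp | app/utils.py | validate_filename
-- ===== SOURCE A (Python) =====
-- def validate_filename(filename: str) -> bool:
--     """Validate filename for basic safety"""
--     if not filename or filename in ('.', '..'):
--         return False
--
--     # Check for dangerous characters
--     dangerous_chars = '<>:"/\\|?*'
--     if any(char in filename for char in dangerous_chars):
--         return False
--
--     # Check for control characters
--     if any(ord(char) < 32 for char in filename):
--         return False
--
--     return True
-- ===== SOURCE B (Python) =====
-- def validate_filename(filename: str) -> bool:
--     """Validate filename for basic safety"""
--     if not filename or filename in ('.', '..'):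
--         return False
--     # single fused pass: every character must be safe
--     return all(ch not in '<>:"/\\|?*' and ord(ch) >= 32 for ch in filename)
-- ===== Notes on version B (the rewrite author's own statement) =====
-- stated objective: simpler
-- what changed: A makes two separate scans (one iterating over the dangerous-character string testing substring membership in the filename, one over the filename for control codes); B makes a single fused pass over the filename with an all() that checks both conditions per character.
import Mathlib
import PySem

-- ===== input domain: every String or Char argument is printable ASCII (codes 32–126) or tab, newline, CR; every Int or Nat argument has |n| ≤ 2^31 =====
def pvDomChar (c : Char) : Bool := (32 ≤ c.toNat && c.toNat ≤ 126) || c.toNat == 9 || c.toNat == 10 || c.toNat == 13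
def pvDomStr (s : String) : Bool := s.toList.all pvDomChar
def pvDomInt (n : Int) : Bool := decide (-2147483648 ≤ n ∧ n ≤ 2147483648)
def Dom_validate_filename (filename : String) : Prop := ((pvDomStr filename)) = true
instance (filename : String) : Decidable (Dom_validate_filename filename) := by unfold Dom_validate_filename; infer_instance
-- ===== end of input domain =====

-- B replaces A's two separate scans by one fused all-pass over the filename (objective: simpler).
-- ===== PORT A =====
-- 'char in filename' for a single char = character membership in the filename's characters
def validate_filename (filename : String) : Bool :=
  if filename = "" || filename = "." || filename = ".." then false
  else if ("<>:\"/\\|?*".toList).any (fun ch => filename.toList.contains ch) then false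
  else if filename.toList.any (fun ch => ch.toNat < 32) then false
  else true

-- ===== PORT B =====
def validate_filename_alt (filename : String) : Bool :=
  if filename = "" || filename = "." || filename = ".." then false
  else filename.toList.all (fun ch => !("<>:\"/\\|?*".toList.contains ch) && 32 ≤ ch.toNat)

-- ===== PRECONDITION & SPEC =====
def Spec_validate_filename (filename : String) (out : Bool) : Prop := out = validate_filename_alt filename
instance (filename : String) (out : Bool) : Decidable (Spec_validate_filename filename out) := by unfold Spec_validate_filename; infer_instance

-- ===== CLAIM (what is proved, stated in full; the proofs are below) =====
def Claim_equal_validate_filename : Prop := ∀ (filename : String), Dom_validate_filename filename → Spec_validate_filename filename (validate_filename filename)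

-- ===== LEMMAS AND PROOFS =====

-- fusing A's two scans over the filename (first scan with swapped iteration order) into B's single all-pass
theorem fused_scans (D l : List Char) :
    (if D.any (fun ch => l.contains ch) then false
     else if l.any (fun ch => ch.toNat < 32) then false else true)
      = l.all (fun ch => !(D.contains ch) && 32 ≤ ch.toNat) := by
  split_ifs with hx hy
  · symm
    rw [List.all_eq_false]
    rw [List.any_eq_true] at hx
    obtain ⟨c, hcD, hcF⟩ := hx
    rw [List.contains_iff_mem] at hcF
    refine ⟨c, hcF, ?_⟩
    simp only [Bool.and_eq_true, Bool.not_eq_true', List.contains_eq_mem,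
      decide_eq_false_iff_not, decide_eq_true_eq, not_and]
    exact fun hcon => absurd hcD hcon
  · symm
    rw [List.all_eq_false]
    rw [List.any_eq_true] at hy
    obtain ⟨c, hcF, hc⟩ := hy
    rw [decide_eq_true_eq] at hc
    refine ⟨c, hcF, ?_⟩
    simp only [Bool.and_eq_true, not_and, decide_eq_true_eq]
    exact fun _ => by omega
  · symm
    rw [List.all_eq_true]
    intro c hc
    simp only [Bool.and_eq_true, Bool.not_eq_true', List.contains_eq_mem,
      decide_eq_false_iff_not, decide_eq_true_eq]
    constructor
    · intro hcD
      exact hx (by rw [List.any_eq_true]; exact ⟨c, hcD, by rwa [List.contains_iff_mem]⟩)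
    · by_contra h
      exact hy (by rw [List.any_eq_true]; exact ⟨c, hc, by simp only [decide_eq_true_eq]; omega⟩)

-- ===== VERDICT (by name: the statement is the Claim_ definition above) =====
theorem validate_filename_spec : Claim_equal_validate_filename := by
  intro filename _
  unfold Spec_validate_filename validate_filename validate_filename_alt
  by_cases h : (decide (filename = "") || decide (filename = ".") || decide (filename = "..")) = true
  · rw [if_pos h, if_pos h]
  · rw [if_neg h, if_neg h]
    exact fused_scans _ _
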